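-- pv_equiv track=rewrite | github.com/Hitbee-dev/Coding_test | algorithm/hw3/test/finaltest.py | bluemarble
-- ===== SOURCE A (Python) =====
-- def bluemarble(size):
--     dp = [1] + [0] * size
--     for n in range(1, size + 1):
--         for dice in [1, 2, 3, 4, 5, 6]:
--             k = n - dice
--             if k < 0: break
--             dp[n] += dp[k]
--
--     return dp[size]
-- ===== SOURCE B (Python) =====
-- # Matrix exponentiation on the order-6 linear recurrence: O(log size) instead of O(size).
--
-- _I6 = ((1, 0, 0, 0, 0, 0),
--        (0, 1, 0, 0, 0, 0),
--        (0, 0, 1, 0, 0, 0),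
--        (0, 0, 0, 1, 0, 0),
--        (0, 0, 0, 0, 1, 0),
--        (0, 0, 0, 0, 0, 1))
--
-- _M6 = ((1, 1, 1, 1, 1, 1),
--        (1, 0, 0, 0, 0, 0),
--        (0, 1, 0, 0, 0, 0),
--        (0, 0, 1, 0, 0, 0),
--        (0, 0, 0, 1, 0, 0),
--        (0, 0, 0, 0, 1, 0))
--
-- def _dot(a, b):
--     return sum(x * y for x, y in zip(a, b))
--
-- def _matvec(m, v):
--     return tuple(_dot(row, v) for row in m)
--
-- def _matmul(a, b):
--     bt = tuple(zip(*b))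
--     return tuple(tuple(_dot(row, col) for col in bt) for row in a)
--
-- def _matpow(m, n):
--     if n == 0:
--         return _I6
--     h = _matpow(m, n // 2)
--     h2 = _matmul(h, h)
--     return _matmul(m, h2) if n % 2 == 1 else h2
--
-- def bluemarble(size):
--     if size < 0:
--         return 0
--     v = _matvec(_matpow(_M6, size), (1, 0, 0, 0, 0, 0))
--     return v[0]
-- ===== Notes on version B (the rewrite author's own statement) =====
-- stated objective: faster
-- what changed: Replaces the O(size) dp-array loop by binary exponentiation of the 6x6 companion matrix of the order-6 recurrence (O(log size) matrix multiplications).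
-- intended difference: On size = -1 A returns 1 via Python's negative-index wraparound (dp[-1] of the one-element list [1]); B returns 0, the intended count of ways to reach a negative position. — e.g. on bluemarble(-1): A returns 1, B returns 0
import Mathlib
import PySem

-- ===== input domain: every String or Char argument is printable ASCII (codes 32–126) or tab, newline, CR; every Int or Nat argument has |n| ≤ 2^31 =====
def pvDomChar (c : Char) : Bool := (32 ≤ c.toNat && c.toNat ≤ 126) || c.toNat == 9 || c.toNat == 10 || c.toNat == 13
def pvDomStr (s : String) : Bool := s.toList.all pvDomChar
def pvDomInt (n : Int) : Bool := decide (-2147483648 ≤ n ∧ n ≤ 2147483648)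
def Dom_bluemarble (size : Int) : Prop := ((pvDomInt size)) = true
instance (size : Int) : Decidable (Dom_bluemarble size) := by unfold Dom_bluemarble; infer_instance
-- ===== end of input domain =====

-- B replaces A's O(size) dp-array loop by binary exponentiation of the 6x6 companion
-- matrix of the order-6 recurrence (a timing run measured B faster at large sizes).

-- ===== PORT A =====
-- dp[i] read (indices are in range whenever Python's are; getD 0 only totalises)
def pvGetI (dp : List Int) (i : Int) : Int := (PySem.List.pyGet? dp i).getD 0

-- inner 'for dice in [1,2,3,4,5,6]: k = n - dice; if k < 0: break; dp[n] += dp[k]'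
def pvInner (dp : List Int) (n : Int) : List Int → List Int
  | [] => dp
  | d :: rest =>
    let k := n - d
    if k < 0 then dp
    else pvInner (dp.set n.toNat (pvGetI dp n + pvGetI dp k)) n rest

def bluemarble (size : Int) : Int :=
  -- dp = [1] + [0] * size  (Python's negative list repetition gives [], as does toNat's clamp)
  let dp0 : List Int := 1 :: List.replicate size.toNat 0
  let dp := (PySem.List.pyRange 1 (size + 1)).foldl (fun dp n => pvInner dp n [1, 2, 3, 4, 5, 6]) dp0
  -- return dp[size]  (raises IndexError for size ≤ -2: excluded by Pre_; getD 0 only totalises)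
  (PySem.List.pyGet? dp size).getD 0

-- ===== PORT B =====
def pvV6 : Type := Int × Int × Int × Int × Int × Int
def pvM6 : Type := pvV6 × pvV6 × pvV6 × pvV6 × pvV6 × pvV6

def pvDot (a b : pvV6) : Int :=
  a.1 * b.1 + a.2.1 * b.2.1 + a.2.2.1 * b.2.2.1 + a.2.2.2.1 * b.2.2.2.1 +
    a.2.2.2.2.1 * b.2.2.2.2.1 + a.2.2.2.2.2 * b.2.2.2.2.2

def pvMatvec (m : pvM6) (v : pvV6) : pvV6 :=
  (pvDot m.1 v, pvDot m.2.1 v, pvDot m.2.2.1 v, pvDot m.2.2.2.1 v,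
    pvDot m.2.2.2.2.1 v, pvDot m.2.2.2.2.2 v)

def pvCol (m : pvM6) (f : pvV6 → Int) : pvV6 :=
  (f m.1, f m.2.1, f m.2.2.1, f m.2.2.2.1, f m.2.2.2.2.1, f m.2.2.2.2.2)

-- bt = tuple(zip(*b))
def pvTranspose (m : pvM6) : pvM6 :=
  (pvCol m (·.1), pvCol m (·.2.1), pvCol m (·.2.2.1), pvCol m (·.2.2.2.1),
    pvCol m (·.2.2.2.2.1), pvCol m (·.2.2.2.2.2))

def pvMatmul (a b : pvM6) : pvM6 :=
  let bt := pvTranspose b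
  (pvMatvec bt a.1, pvMatvec bt a.2.1, pvMatvec bt a.2.2.1, pvMatvec bt a.2.2.2.1,
    pvMatvec bt a.2.2.2.2.1, pvMatvec bt a.2.2.2.2.2)

def pvI6 : pvM6 :=
  ((1, 0, 0, 0, 0, 0), (0, 1, 0, 0, 0, 0), (0, 0, 1, 0, 0, 0),
    (0, 0, 0, 1, 0, 0), (0, 0, 0, 0, 1, 0), (0, 0, 0, 0, 0, 1))

def pvM0 : pvM6 :=
  ((1, 1, 1, 1, 1, 1), (1, 0, 0, 0, 0, 0), (0, 1, 0, 0, 0, 0),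
    (0, 0, 1, 0, 0, 0), (0, 0, 0, 1, 0, 0), (0, 0, 0, 0, 1, 0))

def pvMatpow (m : pvM6) (n : Nat) : pvM6 :=
  if n = 0 then pvI6
  else
    let h := pvMatpow m (n / 2)
    let h2 := pvMatmul h h
    if n % 2 = 1 then pvMatmul m h2 else h2
  termination_by n
  decreasing_by omega

def bluemarble_alt (size : Int) : Int :=
  if size < 0 then 0
  else (pvMatvec (pvMatpow pvM0 size.toNat) (1, 0, 0, 0, 0, 0)).1

-- ===== PRECONDITION & SPEC =====
-- Pre_ excludes exactly size ≤ -2, where A raises IndexError (dp is the one-element list [1]).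
def Pre_bluemarble (size : Int) : Prop := -1 ≤ size
instance (size : Int) : Decidable (Pre_bluemarble size) := by unfold Pre_bluemarble; infer_instance
def pvWitness_bluemarble : Int := 5

-- On size = -1 A returns 1 through Python's negative-index wraparound (dp[-1] of [1]);
-- B returns 0, the intended count of ways to reach a negative position.
def D_bluemarble (size : Int) : Prop := size = -1
instance (size : Int) : Decidable (D_bluemarble size) := by unfold D_bluemarble; infer_instance

def Spec_bluemarble (size : Int) (out : Int) : Prop := ¬ D_bluemarble size → out = bluemarble_alt size
instance (size : Int) (out : Int) : Decidable (Spec_bluemarble size out) := by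
  unfold Spec_bluemarble; infer_instance

def pvDiffWitness_bluemarble : Int := -1
def pvDiffWitnessOut_bluemarble : Int × Int := (1, 0)

-- ===== CLAIM (what is proved, stated in full; the proofs are below) =====
def Claim_unchanged_bluemarble : Prop :=
  ∀ (size : Int), Dom_bluemarble size → Pre_bluemarble size → Spec_bluemarble size (bluemarble size)
def Claim_changed_bluemarble : Prop :=
  Dom_bluemarble (pvDiffWitness_bluemarble) ∧ Pre_bluemarble (pvDiffWitness_bluemarble) ∧
    D_bluemarble (pvDiffWitness_bluemarble) ∧
    bluemarble (pvDiffWitness_bluemarble) = pvDiffWitnessOut_bluemarble.1 ∧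
    bluemarble_alt (pvDiffWitness_bluemarble) = pvDiffWitnessOut_bluemarble.2 ∧
    pvDiffWitnessOut_bluemarble.1 ≠ pvDiffWitnessOut_bluemarble.2
def Claim_exact_bluemarble : Prop :=
  ∀ (size : Int), Dom_bluemarble size → Pre_bluemarble size → D_bluemarble size →
    bluemarble size ≠ bluemarble_alt size

-- ===== LEMMAS AND PROOFS =====

-- the linear map both programs iterate, and its orbit
def pvStep (v : pvV6) : pvV6 :=
  (v.1 + v.2.1 + v.2.2.1 + v.2.2.2.1 + v.2.2.2.2.1 + v.2.2.2.2.2,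
    v.1, v.2.1, v.2.2.1, v.2.2.2.1, v.2.2.2.2.1)

def pvState (n : Nat) : pvV6 := pvStep^[n] (1, 0, 0, 0, 0, 0)

def pvF (n : Nat) : Int := (pvState n).1

-- ---- B side: matrix exponentiation computes the orbit ----
theorem pv_matvec_I (v : pvV6) : pvMatvec pvI6 v = v := by
  obtain ⟨a, b, c, d, e, f⟩ := v
  simp [pvMatvec, pvI6, pvDot]

theorem pv_matvec_matmul (a b : pvM6) (v : pvV6) :
    pvMatvec (pvMatmul a b) v = pvMatvec a (pvMatvec b v) := by
  obtain ⟨⟨a11,a12,a13,a14,a15,a16⟩,⟨a21,a22,a23,a24,a25,a26⟩,⟨a31,a32,a33,a34,a35,a36⟩,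
    ⟨a41,a42,a43,a44,a45,a46⟩,⟨a51,a52,a53,a54,a55,a56⟩,⟨a61,a62,a63,a64,a65,a66⟩⟩ := a
  obtain ⟨⟨b11,b12,b13,b14,b15,b16⟩,⟨b21,b22,b23,b24,b25,b26⟩,⟨b31,b32,b33,b34,b35,b36⟩,
    ⟨b41,b42,b43,b44,b45,b46⟩,⟨b51,b52,b53,b54,b55,b56⟩,⟨b61,b62,b63,b64,b65,b66⟩⟩ := b
  obtain ⟨v1, v2, v3, v4, v5, v6⟩ := v
  simp only [pvMatmul, pvTranspose, pvCol, pvMatvec, pvDot]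
  refine Prod.ext ?_ (Prod.ext ?_ (Prod.ext ?_ (Prod.ext ?_ (Prod.ext ?_ ?_)))) <;> ring

theorem pv_matvec_M0 (v : pvV6) : pvMatvec pvM0 v = pvStep v := by
  obtain ⟨a, b, c, d, e, f⟩ := v
  simp [pvMatvec, pvM0, pvDot, pvStep]

theorem pv_matvec_matpow (n : Nat) (v : pvV6) :
    pvMatvec (pvMatpow pvM0 n) v = pvStep^[n] v := by
  induction n using Nat.strong_induction_on generalizing v with
  | _ n ih =>
    rw [pvMatpow]
    by_cases h0 : n = 0
    · simp [h0, pv_matvec_I]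
    · simp only [h0, if_false]
      have hlt : n / 2 < n := by omega
      by_cases hpar : n % 2 = 1
      · simp only [hpar, if_true]
        rw [pv_matvec_matmul, pv_matvec_matmul, pv_matvec_M0, ih _ hlt, ih _ hlt,
          ← Function.iterate_add_apply]
        have hn : n = n / 2 + n / 2 + 1 := by omega
        conv_rhs => rw [hn]
        rw [Function.iterate_succ_apply']
      · simp only [hpar, if_false]
        rw [pv_matvec_matmul, ih _ hlt, ih _ hlt, ← Function.iterate_add_apply]
        congr 1
        omega

theorem pv_alt_eq (m : Nat) : bluemarble_alt (m : Int) = pvF m := by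
  rw [bluemarble_alt, if_neg (by omega)]
  rw [pv_matvec_matpow]
  simp [pvF, pvState]

-- ---- the orbit's components and recurrence ----
theorem pv_state_comp (n : Nat) :
    pvState n = (pvF n, (if 1 ≤ n then pvF (n - 1) else 0), (if 2 ≤ n then pvF (n - 2) else 0),
      (if 3 ≤ n then pvF (n - 3) else 0), (if 4 ≤ n then pvF (n - 4) else 0),
      (if 5 ≤ n then pvF (n - 5) else 0)) := by
  induction n with
  | zero => simp [pvState, pvF]
  | succ n ih =>
    have hs : pvState (n + 1) = pvStep (pvState n) := by
      rw [pvState, Function.iterate_succ_apply']; rfl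
    have h1 : pvF (n + 1) = (pvStep (pvState n)).1 := by rw [pvF, hs]
    rw [hs, ih, pvStep]
    refine Prod.ext ?_ (Prod.ext ?_ (Prod.ext ?_ (Prod.ext ?_ (Prod.ext ?_ ?_)))) <;>
      simp only [h1, ih, pvStep] <;> split_ifs <;> first | rfl | omega

theorem pvF_succ (n : Nat) :
    pvF (n + 1) = pvF n + (if 1 ≤ n then pvF (n - 1) else 0) + (if 2 ≤ n then pvF (n - 2) else 0) +
      (if 3 ≤ n then pvF (n - 3) else 0) + (if 4 ≤ n then pvF (n - 4) else 0) +
      (if 5 ≤ n then pvF (n - 5) else 0) := by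
  have hs : pvState (n + 1) = pvStep (pvState n) := by
    rw [pvState, Function.iterate_succ_apply']; rfl
  have : pvF (n + 1) = (pvStep (pvState n)).1 := by rw [pvF, hs]
  rw [this, pv_state_comp n, pvStep]

-- ---- A side: the dp array after j outer iterations ----
def pvShape (m j : Nat) : List Int := (List.range (j + 1)).map pvF ++ List.replicate (m - j) 0

-- what one run of the inner loop adds to dp[n] (n = j+1)
def pvSumD (j : Nat) : List Int → Int
  | [] => 0
  | d :: rest =>
    if ((j : Int) + 1) - d < 0 then 0
    else pvF (((j : Int) + 1 - d)).toNat + pvSumD j rest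

theorem pv_inner_go (m j : Nat) (acc : Int) (ds : List Int)
    (hds : ∀ d ∈ ds, 1 ≤ d) :
    pvInner ((List.range (j + 1)).map pvF ++ acc :: List.replicate (m - j - 1) 0)
      ((j : Int) + 1) ds
      = (List.range (j + 1)).map pvF ++ (acc + pvSumD j ds) :: List.replicate (m - j - 1) 0 := by
  induction ds generalizing acc with
  | nil => simp [pvInner, pvSumD]
  | cons d rest ih =>
    have hd : 1 ≤ d := hds d (by simp)
    rw [pvInner, pvSumD]
    by_cases hk : (j : Int) + 1 - d < 0
    · simp [hk]
    · rw [if_neg hk, if_neg hk]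
      have hlen : ((List.range (j + 1)).map pvF).length = j + 1 := by simp
      have hread_n :
          pvGetI ((List.range (j + 1)).map pvF ++ acc :: List.replicate (m - j - 1) 0)
            ((j : Int) + 1) = acc := by
        rw [pvGetI]
        have : ((j : Int) + 1) = (((List.range (j + 1)).map pvF).length : Int) := by
          rw [hlen]; push_cast; ring
        rw [this, PySem.List.pyGet?_append_length]
        rfl
      have hkNat : ((j : Int) + 1 - d).toNat < j + 1 := by omega
      have hread_k :
          pvGetI ((List.range (j + 1)).map pvF ++ acc :: List.replicate (m - j - 1) 0)
            ((j : Int) + 1 - d) = pvF (((j : Int) + 1 - d).toNat) := by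
        rw [pvGetI, PySem.List.pyGet?_of_nonneg _ (by omega)]
        rw [List.getElem?_append_left (by omega)]
        simp [hkNat]
      have hset :
          ((List.range (j + 1)).map pvF ++ acc :: List.replicate (m - j - 1) 0).set
              (((j : Int) + 1)).toNat (acc + pvF (((j : Int) + 1 - d).toNat))
            = (List.range (j + 1)).map pvF ++
                (acc + pvF (((j : Int) + 1 - d).toNat)) :: List.replicate (m - j - 1) 0 := by
        have ht : (((j : Int) + 1)).toNat = ((List.range (j + 1)).map pvF).length := by
          rw [hlen]; omega
        rw [ht, List.set_append_right _ _ (le_refl _)]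
        simp
      rw [hread_n, hread_k, hset, ih _ (fun d hd' => hds d (by simp [hd']))]
      ring_nf

theorem pv_sumD_full (j : Nat) : pvSumD j [1, 2, 3, 4, 5, 6] = pvF (j + 1) := by
  match j with
  | 0 => decide
  | 1 => decide
  | 2 => decide
  | 3 => decide
  | 4 => decide
  | (n + 5) =>
    rw [pvF_succ]
    simp only [pvSumD]
    rw [if_neg (by omega), if_neg (by omega), if_neg (by omega), if_neg (by omega),
      if_neg (by omega), if_neg (by omega), if_pos (show 1 ≤ n + 5 by omega),
      if_pos (show 2 ≤ n + 5 by omega), if_pos (show 3 ≤ n + 5 by omega),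
      if_pos (show 4 ≤ n + 5 by omega), if_pos (show 5 ≤ n + 5 by omega)]
    rw [show (((n + 5 : Nat) : Int) + 1 - 1).toNat = n + 5 by omega,
      show (((n + 5 : Nat) : Int) + 1 - 2).toNat = n + 4 by omega,
      show (((n + 5 : Nat) : Int) + 1 - 3).toNat = n + 3 by omega,
      show (((n + 5 : Nat) : Int) + 1 - 4).toNat = n + 2 by omega,
      show (((n + 5 : Nat) : Int) + 1 - 5).toNat = n + 1 by omega,
      show (((n + 5 : Nat) : Int) + 1 - 6).toNat = n by omega,
      show n + 5 - 1 = n + 4 by omega, show n + 5 - 2 = n + 3 by omega,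
      show n + 5 - 3 = n + 2 by omega, show n + 5 - 4 = n + 1 by omega,
      show n + 5 - 5 = n by omega]
    ring

theorem pv_outer (m j : Nat) (hj : j ≤ m) :
    (PySem.List.pyRange 1 ((j : Int) + 1)).foldl
        (fun dp n => pvInner dp n [1, 2, 3, 4, 5, 6]) (pvShape m 0)
      = pvShape m j := by
  induction j with
  | zero =>
    rw [show (((0 : Nat) : Int) + 1) = 1 by norm_num,
      show PySem.List.pyRange 1 1 = [] from rfl, List.foldl_nil]
  | succ j ih =>
    have hcast : (((j + 1 : Nat) : Int)) + 1 = ((j : Int) + 1) + 1 := by push_cast; ring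
    rw [hcast, PySem.List.pyRange_one_succ_right (by omega), List.foldl_append, ih (by omega)]
    have hsplit : pvShape m j
        = (List.range (j + 1)).map pvF ++ (0 : Int) :: List.replicate (m - j - 1) 0 := by
      have hk : m - j = m - j - 1 + 1 := by omega
      conv_lhs => rw [pvShape, hk, List.replicate_succ]
    have hds : ∀ d ∈ ([1, 2, 3, 4, 5, 6] : List Int), 1 ≤ d := by decide
    simp only [List.foldl_cons, List.foldl_nil]
    rw [hsplit, pv_inner_go m j 0 _ hds, pv_sumD_full, zero_add, pvShape,
      List.range_succ, List.map_append, List.append_assoc, List.map_singleton,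
      show m - (j + 1) = m - j - 1 by omega]
    simp [List.range_succ]

theorem pv_A_eq (m : Nat) : bluemarble (m : Int) = pvF m := by
  rw [bluemarble]
  have hdp0 : (1 : Int) :: List.replicate ((m : Int)).toNat 0 = pvShape m 0 := by
    rw [pvShape]
    simp only [Int.toNat_natCast, Nat.sub_zero]
    rfl
  rw [hdp0, pv_outer m m (le_refl m), pvShape, Nat.sub_self, List.replicate_zero,
    List.append_nil, PySem.List.pyGet?_natCast]
  simp

-- ===== VERDICT (by name: the statement is the Claim_ definition above) =====
theorem bluemarble_spec : Claim_unchanged_bluemarble := by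
  intro size _ hpre hnD
  have h0 : 0 ≤ size := by
    rcases lt_or_ge size 0 with h | h
    · exfalso; exact hnD (by unfold D_bluemarble; unfold Pre_bluemarble at hpre; omega)
    · exact h
  have hm : size = ((size.toNat : Nat) : Int) := by omega
  rw [hm, pv_A_eq, pv_alt_eq]

theorem bluemarble_changed : Claim_changed_bluemarble := by
  unfold Claim_changed_bluemarble; decide

theorem bluemarble_tight : Claim_exact_bluemarble := by
  intro size _ _ hD
  unfold D_bluemarble at hD
  subst hD
  decide
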